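-- pv_equiv track=rewrite | github.com/ZhengWG/Code-practise | Leetcode/Template/核心框架/二分.py | right_bound_search
-- ===== SOURCE A (Python) =====
-- def right_bound_search(nums, target):
--     """
--     @brief      查找右边界
--     """
--     left = 0
--     right = len(nums) - 1
--     while (left <= right):
--         mid = left + (right - left) // 2
--         if nums[mid] < target:
--             left = mid + 1
--         elif nums[mid] > target:
--             right = mid - 1
--         elif nums[mid] == target:
--             # 不返回，锁定右边界
--             left = mid + 1
--
--     # 最后检查right越界情况
--     if right < 0 or nums[right] != target:
--         return -1
--     return right
-- ===== SOURCE B (Python) =====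
-- def right_bound_search(nums, target):
--     """
--     @brief      查找右边界 (recursive divide-and-conquer formulation)
--     """
--     def go(left, right):
--         if left > right:
--             return -1 if right < 0 or nums[right] != target else right
--         mid = left + (right - left) // 2
--         if nums[mid] <= target:
--             return go(mid + 1, right)
--         return go(left, mid - 1)
--     return go(0, len(nums) - 1)
-- ===== Notes on version B (the rewrite author's own statement) =====
-- stated objective: alternative
-- what changed: Replaces A's imperative while-loop with mutable left/right and a separate post-loop boundary check by a divide-and-conquer recursion whose base case performs the check and whose three branches are merged into a single <= comparison.
import Mathlib
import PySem

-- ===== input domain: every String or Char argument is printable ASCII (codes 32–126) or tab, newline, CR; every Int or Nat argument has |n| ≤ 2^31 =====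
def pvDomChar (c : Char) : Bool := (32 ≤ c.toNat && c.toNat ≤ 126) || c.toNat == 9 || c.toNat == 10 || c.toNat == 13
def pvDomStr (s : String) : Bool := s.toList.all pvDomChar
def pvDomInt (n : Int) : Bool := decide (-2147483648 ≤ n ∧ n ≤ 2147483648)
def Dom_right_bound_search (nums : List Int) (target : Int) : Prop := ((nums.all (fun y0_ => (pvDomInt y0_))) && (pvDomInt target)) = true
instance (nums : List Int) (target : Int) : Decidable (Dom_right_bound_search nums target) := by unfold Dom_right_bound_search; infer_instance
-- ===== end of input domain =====

-- B rewrites A's imperative while-loop as a divide-and-conquer recursion with the <=-merged branch; objective: alternative (same cost).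
-- Fuel (nums.length + 1 ≥ number of loop iterations) is only a totality guard; all probed indices are provably in range, so pyGetD
-- (default never used) is an exact port of nums[mid]/nums[right].

-- ===== PORT A =====
-- the while-loop of A, returning the final value of `right`; one fuel unit per iteration
def rbsLoop (nums : List Int) (target : Int) : Nat → Int → Int → Int
  | 0, _, right => right
  | fuel + 1, left, right =>
    if left ≤ right then
      if PySem.List.pyGetD nums (left + PySem.Int.floordiv (right - left) 2) 0 < target then
        rbsLoop nums target fuel (left + PySem.Int.floordiv (right - left) 2 + 1) right
      else if PySem.List.pyGetD nums (left + PySem.Int.floordiv (right - left) 2) 0 > target then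
        rbsLoop nums target fuel left (left + PySem.Int.floordiv (right - left) 2 - 1)
      else
        rbsLoop nums target fuel (left + PySem.Int.floordiv (right - left) 2 + 1) right
    else right

def right_bound_search (nums : List Int) (target : Int) : Int :=
  if rbsLoop nums target (nums.length + 1) 0 ((nums.length : Int) - 1) < 0 ∨
     PySem.List.pyGetD nums (rbsLoop nums target (nums.length + 1) 0 ((nums.length : Int) - 1)) 0 ≠ target then -1
  else rbsLoop nums target (nums.length + 1) 0 ((nums.length : Int) - 1)

-- ===== PORT B =====
-- recursive helper `go` of B: base case does the boundary check, recursive case merges the < and == branches into ≤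
def rbsGo (nums : List Int) (target : Int) : Nat → Int → Int → Int
  | 0, _, right => if right < 0 ∨ PySem.List.pyGetD nums right 0 ≠ target then -1 else right
  | fuel + 1, left, right =>
    if left > right then
      if right < 0 ∨ PySem.List.pyGetD nums right 0 ≠ target then -1 else right
    else
      if PySem.List.pyGetD nums (left + PySem.Int.floordiv (right - left) 2) 0 ≤ target then
        rbsGo nums target fuel (left + PySem.Int.floordiv (right - left) 2 + 1) right
      else
        rbsGo nums target fuel left (left + PySem.Int.floordiv (right - left) 2 - 1)

def right_bound_search_alt (nums : List Int) (target : Int) : Int :=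
  rbsGo nums target (nums.length + 1) 0 ((nums.length : Int) - 1)

-- ===== PRECONDITION & SPEC =====
def Spec_right_bound_search (nums : List Int) (target : Int) (out : Int) : Prop := out = right_bound_search_alt nums target
instance (nums : List Int) (target : Int) (out : Int) : Decidable (Spec_right_bound_search nums target out) := by unfold Spec_right_bound_search; infer_instance

-- ===== CLAIM (what is proved, stated in full; the proofs are below) =====
def Claim_equal_right_bound_search : Prop := ∀ (nums : List Int) (target : Int), Dom_right_bound_search nums target → Spec_right_bound_search nums target (right_bound_search nums target)

-- ===== LEMMAS AND PROOFS =====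

-- A's post-loop boundary check as a function of the final `right`
def rbsPost (nums : List Int) (target : Int) (r : Int) : Int :=
  if r < 0 ∨ PySem.List.pyGetD nums r 0 ≠ target then -1 else r

lemma rbsGo_eq_post_loop (nums : List Int) (target : Int) :
    ∀ (fuel : Nat) (left right : Int),
      rbsGo nums target fuel left right = rbsPost nums target (rbsLoop nums target fuel left right) := by
  intro fuel
  induction fuel with
  | zero => intro left right; rfl
  | succ fuel ih =>
    intro left right
    by_cases hlr : left ≤ right
    · rw [rbsGo, rbsLoop, if_neg (by omega : ¬ left > right), if_pos hlr]
      set v := PySem.List.pyGetD nums (left + PySem.Int.floordiv (right - left) 2) 0 with hv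
      by_cases h1 : v < target
      · rw [if_pos (le_of_lt h1), if_pos h1]; exact ih _ _
      · by_cases h2 : v > target
        · rw [if_neg (by omega), if_neg h1, if_pos h2]; exact ih _ _
        · rw [if_pos (by omega), if_neg h1, if_neg h2]; exact ih _ _
    · rw [rbsGo, rbsLoop, if_pos (by omega : left > right), if_neg hlr]
      rfl

-- ===== VERDICT (by name: the statement is the Claim_ definition above) =====
theorem right_bound_search_spec : Claim_equal_right_bound_search := by
  intro nums target _
  show right_bound_search nums target = right_bound_search_alt nums target
  rw [right_bound_search_alt, rbsGo_eq_post_loop]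
  rfl
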